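-- pv_equiv track=rewrite | github.com/piersto/cs50p | test/test_05/plates.py | zero_not_at_the_beginning
-- ===== SOURCE A (Python) =====
-- def zero_not_at_the_beginning(s):
--     s_list = list(s)
--     n_list = []
--
--     for i in s_list:
--         if i.isdigit():
--             n_list.append(i)
--         else:
--             pass
--     if len(n_list) == 0:
--         return True
--     elif n_list[0] != "0":
--         return True
-- ===== SOURCE B (Python) =====
-- def zero_not_at_the_beginning(s):
--     first = next((c for c in s if c.isdigit()), None)
--     if first == "0":
--         return
--     return True
-- ===== Notes on version B (the rewrite author's own statement) =====
-- stated objective: simpler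
-- what changed: Replaces the collect-all-digits-into-a-list-then-index pass by a single early-exit first-match scan (next over a generator) that stops at the first digit.
import Mathlib
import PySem

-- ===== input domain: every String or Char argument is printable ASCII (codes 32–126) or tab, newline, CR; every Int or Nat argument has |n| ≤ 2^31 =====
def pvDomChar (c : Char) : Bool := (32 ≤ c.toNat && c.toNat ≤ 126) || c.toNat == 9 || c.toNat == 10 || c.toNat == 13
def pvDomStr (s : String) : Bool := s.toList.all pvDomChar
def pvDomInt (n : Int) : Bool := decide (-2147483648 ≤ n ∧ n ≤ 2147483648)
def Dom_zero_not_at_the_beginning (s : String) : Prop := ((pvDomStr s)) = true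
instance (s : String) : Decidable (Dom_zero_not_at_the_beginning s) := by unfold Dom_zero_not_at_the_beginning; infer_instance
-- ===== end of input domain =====

-- B replaces A's collect-all-digits-then-index pass by a single early-exit first-digit scan (simpler).


-- ===== PORT A =====
def zero_not_at_the_beginning (s : String) : Option Bool :=
  let s_list := s.toList
  let n_list := s_list.foldl (fun acc i => if PySem.Chars.isdigit i then acc ++ [i] else acc) []
  if n_list.length = 0 then some true
  else if n_list.head? ≠ some '0' then some true
  else none

-- ===== PORT B =====
def zero_not_at_the_beginning_alt (s : String) : Option Bool :=
  match s.toList.find? (fun c => PySem.Chars.isdigit c) with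
  | some c => if c = '0' then none else some true
  | none => some true

-- ===== PRECONDITION & SPEC =====
def Spec_zero_not_at_the_beginning (s : String) (out : Option Bool) : Prop := out = zero_not_at_the_beginning_alt s
instance (s : String) (out : Option Bool) : Decidable (Spec_zero_not_at_the_beginning s out) := by unfold Spec_zero_not_at_the_beginning; infer_instance

-- ===== CLAIM (what is proved, stated in full; the proofs are below) =====
def Claim_equal_zero_not_at_the_beginning : Prop := ∀ (s : String), Dom_zero_not_at_the_beginning s → Spec_zero_not_at_the_beginning s (zero_not_at_the_beginning s)

-- ===== LEMMAS AND PROOFS =====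
theorem pv_foldl_filter (l acc : List Char) :
    l.foldl (fun acc i => if PySem.Chars.isdigit i then acc ++ [i] else acc) acc
      = acc ++ l.filter (fun i => PySem.Chars.isdigit i) := by
  induction l generalizing acc with
  | nil => simp
  | cons c t ih =>
    by_cases h : PySem.Chars.isdigit c = true <;> simp [List.foldl, List.filter, h, ih]

theorem pv_list_eq (l : List Char) :
    (if (l.filter (fun i => PySem.Chars.isdigit i)).length = 0 then some true
     else if (l.filter (fun i => PySem.Chars.isdigit i)).head? ≠ some '0' then some true
     else none)
    = (match l.find? (fun c => PySem.Chars.isdigit c) with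
       | some c => if c = '0' then none else some true
       | none => some true) := by
  induction l with
  | nil => simp
  | cons c t ih =>
    by_cases h : PySem.Chars.isdigit c = true
    · simp only [List.filter, List.find?, h]
      by_cases hz : c = '0' <;> simp [hz]
    · simpa [List.filter, List.find?, h] using ih

-- ===== VERDICT (by name: the statement is the Claim_ definition above) =====
theorem zero_not_at_the_beginning_spec : Claim_equal_zero_not_at_the_beginning := by
  intro s _
  unfold Spec_zero_not_at_the_beginning zero_not_at_the_beginning zero_not_at_the_beginning_alt
  simp only [pv_foldl_filter, List.nil_append]
  exact pv_list_eq s.toList
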